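-- pv_equiv track=rewrite | github.com/jcthomassie/euler | euler/problem_38.py | concatenated_product
-- ===== SOURCE A (Python) =====
-- def concatenated_product(n_str: str) -> bool:
--     """Return True if the input number is a 'concatenated product'."""
--     # Check all prefixes
--     for i in range(1, len(n_str) // 2 + 1):
--         seed = int(n_str[:i])
--         term = 1
--         rhs = n_str[i:]
--         while rhs:
--             term += 1
--             lhs = f"{term * seed}"
--             if rhs.startswith(lhs):
--                 rhs = rhs[len(lhs) :]
--             else:
--                 break
--         else:
--             return True
--     return False
-- ===== SOURCE B (Python) =====
-- def concatenated_product(n_str: str) -> bool: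
--     """Return True if the input number is a 'concatenated product'."""
--     n = len(n_str)
--     for i in range(1, n // 2 + 1):
--         seed = int(n_str[:i])
--         # Reconstruct the concatenated suffix arithmetically: accumulate the
--         # value and total digit length of str(2*seed) + str(3*seed) + ...
--         val, length, term = 0, 0, 1
--         while i + length < n:
--             term += 1
--             t = term * seed
--             d = len(str(t))
--             val = val * 10 ** d + t
--             length += d
--         if i + length == n and str(val).zfill(n - i) == n_str[i:]:
--             return True
--     return False
-- ===== Notes on version B (the rewrite author's own statement) =====
-- stated objective: alternative
-- what changed: A matches the string incrementally (startswith on the remaining suffix, slicing it away, early break); B never matches or concatenates strings: it accumulates the integer VALUE and total digit length of str(2*seed)+str(3*seed)+... arithmetically (val = val*10**d + term*seed) and performs one zfill-padded string comparison against the suffix at the end.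
-- outside the precondition, e.g. on concatenated_product('1 23'): A returns True, B returns True; on concatenated_product('  12'): A raises ValueError, B raises ValueError
import Mathlib
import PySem

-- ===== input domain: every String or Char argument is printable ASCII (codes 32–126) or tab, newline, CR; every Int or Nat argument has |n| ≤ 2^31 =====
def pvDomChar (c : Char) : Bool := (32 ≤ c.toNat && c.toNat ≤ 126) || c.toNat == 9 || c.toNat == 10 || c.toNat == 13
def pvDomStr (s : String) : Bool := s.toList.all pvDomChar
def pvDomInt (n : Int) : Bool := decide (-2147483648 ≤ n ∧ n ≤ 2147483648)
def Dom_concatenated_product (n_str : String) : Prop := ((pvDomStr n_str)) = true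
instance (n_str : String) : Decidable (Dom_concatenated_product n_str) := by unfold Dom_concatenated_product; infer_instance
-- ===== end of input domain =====

-- B replaces A's match-and-consume string loop (startswith + slice + break) by an arithmetic
-- reconstruction: it accumulates the VALUE and digit LENGTH of the concatenated multiples and
-- does one zfill-compare against the suffix; alternative algorithm, same asymptotic cost.


-- str(n) is never the empty string (cited by both ports' while loops for termination)
theorem pvToDigitsCore_le (b : Nat) : ∀ (f n : Nat) (l : List Char),
    l.length ≤ (Nat.toDigitsCore b f n l).length := by
  intro f
  induction f with
  | zero => intro n l; simp [Nat.toDigitsCore]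
  | succ f ih =>
    intro n l
    simp only [Nat.toDigitsCore]
    split
    · simp
    · exact le_trans (by simp) (ih (n / b) (Nat.digitChar (n % b) :: l))

theorem pvToChars_ne_nil (n : Int) : (PySem.Int.toChars n).length ≠ 0 := by
  simp only [PySem.Int.toChars]
  split
  · simp
  · simp only [Nat.toDigits, Nat.toDigitsCore]
    split
    · simp
    · have h := pvToDigitsCore_le 10 n.toNat (n.toNat / 10) [Nat.digitChar (n.toNat % 10)]
      simp only [List.length_cons, List.length_nil] at h
      omega

-- ===== PORT A =====
-- inner while loop of A: term += 1; lhs = f"{term * seed}"; consume a matching prefix or break;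
-- the for-else arm ('return True') corresponds to the [] case
def cpAWhile (seed : Int) (term : Int) (rhs : List Char) : Bool :=
  if h : rhs = [] then true
  else
    let lhs := PySem.Int.toChars ((term + 1) * seed)
    if PySem.Chars.startswith rhs lhs then
      cpAWhile seed (term + 1) (PySem.List.slice rhs (some (lhs.length : Int)) none)  -- rhs[len(lhs):]
    else false
termination_by rhs.length
decreasing_by
  rw [PySem.List.slice_from_natCast]
  have h1 := pvToChars_ne_nil ((term + 1) * seed)
  have h2 : rhs.length ≠ 0 := by simpa using h
  simp only [List.length_drop]; omega

-- outer for loop of A over range(1, len(n_str)//2 + 1)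
def cpAFor (s : List Char) : List Int → Bool
  | [] => false
  | i :: rest =>
    match PySem.Int.ofChars? (PySem.List.slice s none (some i)) with  -- seed = int(n_str[:i])
    | none => false        -- int() raises ValueError here; such inputs are outside Pre_
    | some seed =>
      if cpAWhile seed 1 (PySem.List.slice s (some i) none) then true  -- for-else: return True
      else cpAFor s rest

def concatenated_product (n_str : String) : Bool :=
  -- len(n_str) // 2 on the nonnegative length is Nat division
  cpAFor n_str.toList (PySem.List.pyRange 1 ((n_str.toList.length / 2 : Nat) + 1) 1)

-- ===== PORT B =====
-- inner while loop of B: term += 1; t = term * seed; d = len(str(t));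
-- val = val * 10 ** d + t; length += d   — returns the final (val, length)
def cpBLoop (n i seed : Int) (val length term : Int) : Int × Int :=
  if h : i + length < n then
    cpBLoop n i seed
      (val * 10 ^ (PySem.Int.toChars ((term + 1) * seed)).length + (term + 1) * seed)
      (length + ((PySem.Int.toChars ((term + 1) * seed)).length : Int))
      (term + 1)
  else (val, length)
termination_by (n - (i + length)).toNat
decreasing_by
  have hd := pvToChars_ne_nil ((term + 1) * seed)
  omega

-- outer for loop of B: seed = int(n_str[:i]); run the accumulation loop from (0, 0, 1);
-- then the single check 'i + length == n and str(val).zfill(n - i) == n_str[i:]'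
def cpBFor (s : List Char) (n : Int) : List Int → Bool
  | [] => false
  | i :: rest =>
    match PySem.Int.ofChars? (PySem.List.slice s none (some i)) with  -- seed = int(n_str[:i])
    | none => false        -- int() raises ValueError here; such inputs are outside Pre_
    | some seed =>
      let p := cpBLoop n i seed 0 0 1
      if i + p.2 == n
          && PySem.Chars.zfill (PySem.Int.toChars p.1) (n - i) == PySem.List.slice s (some i) none
      then true
      else cpBFor s n rest

def concatenated_product_alt (n_str : String) : Bool :=
  cpBFor n_str.toList (n_str.toList.length : Int)
    (PySem.List.pyRange 1 ((n_str.toList.length / 2 : Nat) + 1) 1)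

-- ===== PRECONDITION & SPEC =====
-- Pre_ excludes inputs where int(n_str[:i]) can raise ValueError: which prefix is reached depends
-- on execution, so Pre_ conservatively requires the first len//2 characters to be ASCII digits,
-- thereby also excluding some inputs on which A happens to return (e.g. '1 23').
def Pre_concatenated_product (n_str : String) : Prop :=
  ((n_str.toList.take (n_str.toList.length / 2)).all PySem.Chars.isdigit) = true
instance (n_str : String) : Decidable (Pre_concatenated_product n_str) := by
  unfold Pre_concatenated_product; infer_instance

def pvWitness_concatenated_product : String := "192384576"

def Spec_concatenated_product (n_str : String) (out : Bool) : Prop := out = concatenated_product_alt n_str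
instance (n_str : String) (out : Bool) : Decidable (Spec_concatenated_product n_str out) := by unfold Spec_concatenated_product; infer_instance

-- ===== CLAIM (what is proved, stated in full; the proofs are below) =====
def Claim_equal_concatenated_product : Prop := ∀ (n_str : String), Dom_concatenated_product n_str → Pre_concatenated_product n_str → Spec_concatenated_product n_str (concatenated_product n_str)

-- ===== LEMMAS AND PROOFS =====

-- numeric value of a digit string (ghost, proofs only)
def strV (cs : List Char) : Nat := cs.foldl (fun a c => a * 10 + (c.toNat - 48)) 0

-- ghost chunk accumulator: the list of characters appended by either inner loop
def chunks (n : Nat) (seed : Int) (term : Int) (i : Nat) (C : List Char) : List Char :=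
  if _h : i + C.length < n then
    chunks n seed (term + 1) i (C ++ PySem.Int.toChars ((term + 1) * seed))
  else C
termination_by n - (i + C.length)
decreasing_by
  have := pvToChars_ne_nil ((term + 1) * seed)
  simp only [List.length_append]; omega

-- ghost string builder matching A's consumption (proofs only)
def cpBBuild (n : Nat) (seed : Int) (term : Int) (build : List Char) : List Char :=
  if _h : build.length < n then
    cpBBuild n seed (term + 1) (build ++ PySem.Int.toChars ((term + 1) * seed))
  else build
termination_by n - build.length
decreasing_by
  have := pvToChars_ne_nil ((term + 1) * seed)
  simp only [List.length_append]; omega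

theorem strV_foldl_acc (cs : List Char) : ∀ a : Nat,
    cs.foldl (fun a c => a * 10 + (c.toNat - 48)) a = a * 10 ^ cs.length + strV cs := by
  induction cs with
  | nil => intro a; simp [strV]
  | cons c cs ih =>
    intro a
    simp only [List.foldl_cons, List.length_cons, strV]
    rw [ih (a * 10 + (c.toNat - 48)), ih (0 * 10 + (c.toNat - 48))]
    ring

theorem strV_append (x y : List Char) : strV (x ++ y) = strV x * 10 ^ y.length + strV y := by
  show (x ++ y).foldl _ 0 = _
  rw [List.foldl_append]
  exact strV_foldl_acc y (strV x)

theorem strV_cons (c : Char) (cs : List Char) :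
    strV (c :: cs) = (c.toNat - 48) * 10 ^ cs.length + strV cs := by
  show (c :: cs).foldl _ 0 = _
  simp only [List.foldl_cons]
  rw [strV_foldl_acc cs]
  ring

theorem digit_toNat (c : Char) (h : PySem.Chars.isdigit c = true) :
    48 ≤ c.toNat ∧ c.toNat ≤ 57 := by
  simp only [PySem.Chars.isdigit, Bool.and_eq_true, decide_eq_true_eq, Char.le_def] at h
  obtain ⟨h1, h2⟩ := h
  exact ⟨h1, h2⟩

theorem strV_replicate_zero (k : Nat) : strV (List.replicate k '0') = 0 := by
  induction k with
  | zero => rfl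
  | succ k ih => rw [List.replicate_succ, strV_cons, ih]; simp

theorem strV_lt (cs : List Char) (h : cs.all PySem.Chars.isdigit) : strV cs < 10 ^ cs.length := by
  induction cs with
  | nil => simp [strV]
  | cons c cs ih =>
    simp only [List.all_cons, Bool.and_eq_true] at h
    have hc := digit_toNat c h.1
    have hcs := ih h.2
    rw [strV_cons]
    have h9 : c.toNat - 48 ≤ 9 := by omega
    have : (c.toNat - 48) * 10 ^ cs.length ≤ 9 * 10 ^ cs.length :=
      Nat.mul_le_mul_right _ h9
    simp only [List.length_cons, pow_succ]
    nlinarith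

theorem digitChar_val (m : Nat) (hm : m < 10) :
    strV [Nat.digitChar m] = m ∧ PySem.Chars.isdigit (Nat.digitChar m) = true := by
  interval_cases m <;> exact ⟨by decide, by decide⟩

theorem strV_toDigits (v : Nat) :
    strV (Nat.toDigits 10 v) = v ∧ (Nat.toDigits 10 v).all PySem.Chars.isdigit := by
  induction v using Nat.strong_induction_on with
  | _ v ih =>
    rw [Nat.toDigits_eq_if (by norm_num)]
    by_cases hv : v < 10
    · rw [if_pos hv]
      exact ⟨(digitChar_val v hv).1, by simp [(digitChar_val v hv).2]⟩
    · rw [if_neg hv]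
      have hdiv : v / 10 < v := Nat.div_lt_self (by omega) (by norm_num)
      obtain ⟨ihv, ihd⟩ := ih (v / 10) hdiv
      have hm := digitChar_val (v % 10) (Nat.mod_lt _ (by norm_num))
      constructor
      · rw [strV_append, ihv, hm.1]
        simp only [List.length_cons, List.length_nil]
        omega
      · simp only [List.all_append, Bool.and_eq_true]
        exact ⟨ihd, by simp [hm.2]⟩

theorem strV_toChars (t : Int) (ht : 0 ≤ t) :
    strV (PySem.Int.toChars t) = t.toNat ∧ (PySem.Int.toChars t).all PySem.Chars.isdigit := by
  simp only [PySem.Int.toChars, if_neg (by omega : ¬ t < 0)]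
  exact strV_toDigits t.toNat

theorem strV_inj (cs : List Char) : ∀ ds : List Char, cs.all PySem.Chars.isdigit →
    ds.all PySem.Chars.isdigit → cs.length = ds.length → strV cs = strV ds → cs = ds := by
  induction cs with
  | nil => intro ds _ _ hlen _; exact (List.length_eq_zero_iff.mp hlen.symm).symm
  | cons c cs ih =>
    intro ds hcd hdd hlen hv
    cases ds with
    | nil => simp at hlen
    | cons d ds =>
      simp only [List.all_cons, Bool.and_eq_true] at hcd hdd
      simp only [List.length_cons, Nat.succ_inj] at hlen
      rw [strV_cons, strV_cons, hlen] at hv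
      have hc := digit_toNat c hcd.1
      have hd := digit_toNat d hdd.1
      have hcs := strV_lt cs hcd.2
      have hds := strV_lt ds hdd.2
      rw [hlen] at hcs
      have hdve : c.toNat - 48 = d.toNat - 48 := by
        by_contra hne
        rcases Nat.lt_or_ge (c.toNat - 48) (d.toNat - 48) with hlt | hge
        · have : (c.toNat - 48 + 1) * 10 ^ ds.length ≤ (d.toNat - 48) * 10 ^ ds.length :=
            Nat.mul_le_mul_right _ hlt
          nlinarith
        · have hlt' : d.toNat - 48 < c.toNat - 48 := by omega
          have : (d.toNat - 48 + 1) * 10 ^ ds.length ≤ (c.toNat - 48) * 10 ^ ds.length :=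
            Nat.mul_le_mul_right _ hlt'
          nlinarith
      have hsv : strV cs = strV ds := by
        rw [hdve] at hv; omega
      have : c = d := by
        have htn0 : c.toNat = d.toNat := by omega
        have htn : c.val.toNat = d.val.toNat := htn0
        exact Char.ext (UInt32.toNat_inj.mp htn)
      rw [this, ih ds hcd.2 hdd.2 hlen hsv]

-- the digit-string identity: d == str(int(d)).zfill(len(d))
theorem zfill_toChars_strV (d : List Char) (hd : d.all PySem.Chars.isdigit) (hne : d ≠ []) :
    PySem.Chars.zfill (PySem.Int.toChars (strV d : Int)) (d.length : Int) = d := by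
  obtain ⟨hval, hdig⟩ := strV_toChars (strV d : Int) (Int.natCast_nonneg _)
  rw [Int.toNat_natCast] at hval
  have hlpos : 0 < d.length := List.length_pos_iff.mpr hne
  have hulen : (PySem.Int.toChars (strV d : Int)).length ≤ d.length := by
    simp only [PySem.Int.toChars, if_neg (by omega : ¬ (strV d : Int) < 0), Int.toNat_natCast]
    exact Nat.toDigits_length 10 (strV d) d.length hlpos (strV_lt d hd)
  have hune : (PySem.Int.toChars (strV d : Int)).length ≠ 0 := pvToChars_ne_nil _
  rw [PySem.Chars.zfill.eq_def]
  split
  · rename_i hle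
    have : (PySem.Int.toChars (strV d : Int)).length = d.length := by omega
    exact strV_inj _ d hdig hd this (by rw [hval])
  · rename_i hgt
    cases hu : PySem.Int.toChars (strV d : Int) with
    | nil => exact absurd (congrArg List.length hu) (by simpa using hune)
    | cons c rest =>
      have hcdig : PySem.Chars.isdigit c = true := by
        have := hdig; rw [hu] at this
        simp only [List.all_cons, Bool.and_eq_true] at this
        exact this.1
      have hcn := digit_toNat c hcdig
      split
      · rename_i c1 tail1 heq
        injection heq with h1 h2
        subst h1; subst h2
        rw [if_neg (by rintro (rfl | rfl) <;> exact absurd hcn (by decide))]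
        rw [← hu]
        apply strV_inj
        · simp only [List.all_append, Bool.and_eq_true]
          refine ⟨?_, hdig⟩
          simp only [List.all_eq_true]
          intro x hx
          rw [List.eq_of_mem_replicate hx]
          decide
        · exact hd
        · simp only [List.length_append, List.length_replicate, Int.toNat_natCast]
          omega
        · rw [strV_append, strV_replicate_zero, hval]
          simp
      · rename_i heq
        exact absurd heq (by simp)

-- int() on an all-digit string never returns a negative value:
-- the digits branch of ofChars? wraps a Nat in Int.ofNat
theorem ofChars_digits_nonneg (ds : List Char) (hd : ds.all PySem.Chars.isdigit) (hne : ds ≠ [])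
    (v : Int) (h : PySem.Int.ofChars? ds = some v) : 0 ≤ v := by
  have hns : ∀ c ∈ ds, PySem.Int.isIntSpace c = false := by
    intro c hc
    have := List.all_eq_true.mp hd c hc
    simp only [PySem.Chars.isdigit, Bool.and_eq_true, decide_eq_true_eq, Char.le_def] at this
    obtain ⟨h1, h2⟩ := this
    simp only [PySem.Int.isIntSpace, Bool.or_eq_false_iff, decide_eq_false_iff_not]
    refine ⟨⟨⟨⟨⟨?_, ?_⟩, ?_⟩, ?_⟩, ?_⟩, ?_⟩ <;> (intro he; subst he; simp at h1 h2)
  have hdw1 : List.dropWhile PySem.Int.isIntSpace ds = ds := by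
    cases ds with
    | nil => rfl
    | cons c cs =>
      rw [List.dropWhile_cons_of_neg]
      simp [hns c (List.mem_cons_self)]
  have hdw2 : List.dropWhile PySem.Int.isIntSpace ds.reverse = ds.reverse := by
    cases hq : ds.reverse with
    | nil => rfl
    | cons c cs =>
      rw [List.dropWhile_cons_of_neg]
      have : c ∈ ds := by
        have : c ∈ ds.reverse := by rw [hq]; exact List.mem_cons_self
        simpa using this
      simp [hns c this]
  rw [PySem.Int.ofChars?] at h
  simp only [hdw1, hdw2, List.reverse_reverse] at h
  split at h
  · simp [PySem.Chars.isdigit] at hd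
  · simp [PySem.Chars.isdigit] at hd
  · simp only [Option.map_eq_some_iff, bind, Option.bind_eq_some_iff] at h
    obtain ⟨b, ⟨a, _, hpa⟩, hbv⟩ := h
    simp only [Option.pure_def, Option.some.injEq] at hpa
    subst hpa; subst hbv
    exact Int.natCast_nonneg a

-- cpBLoop computes (value, length) of the ghost chunk list
theorem cpBLoop_chunks (n i : Nat) (seed : Int) (hseed : 0 ≤ seed) : ∀ (term : Int) (C : List Char),
    1 ≤ term → C.all PySem.Chars.isdigit →
    cpBLoop (n : Int) (i : Int) seed (strV C : Int) (C.length : Int) term =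
      ((strV (chunks n seed term i C) : Int), ((chunks n seed term i C).length : Int)) ∧
    (chunks n seed term i C).all PySem.Chars.isdigit := by
  intro term C
  induction term, C using chunks.induct n seed i with
  | case1 term C hlt ih =>
    intro hterm hC
    have ht : 0 ≤ (term + 1) * seed := mul_nonneg (by omega) hseed
    obtain ⟨hval, hdig⟩ := strV_toChars ((term + 1) * seed) ht
    have hC' : (C ++ PySem.Int.toChars ((term + 1) * seed)).all PySem.Chars.isdigit := by
      simp only [List.all_append, Bool.and_eq_true]; exact ⟨hC, hdig⟩
    rw [chunks, dif_pos hlt, cpBLoop, dif_pos (by exact_mod_cast hlt)]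
    have h1 : (strV C : Int) * 10 ^ (PySem.Int.toChars ((term + 1) * seed)).length
        + (term + 1) * seed
        = ((strV (C ++ PySem.Int.toChars ((term + 1) * seed)) : Nat) : Int) := by
      rw [strV_append, hval]
      push_cast
      omega
    have h2 : (C.length : Int) + ((PySem.Int.toChars ((term + 1) * seed)).length : Int)
        = (((C ++ PySem.Int.toChars ((term + 1) * seed)).length : Nat) : Int) := by
      simp [List.length_append]
    rw [h1, h2]
    exact ih (by omega) hC'
  | case2 term C hge =>
    intro hterm hC
    rw [chunks, dif_neg hge, cpBLoop, dif_neg (by exact_mod_cast hge)]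
    exact ⟨rfl, hC⟩

-- cpBBuild is the prefix followed by the ghost chunk list
theorem cpBBuild_chunks (n : Nat) (seed : Int) (pre : List Char) : ∀ (term : Int) (C : List Char),
    cpBBuild n seed term (pre ++ C) = pre ++ chunks n seed term pre.length C := by
  intro term C
  induction term, C using chunks.induct n seed pre.length with
  | case1 term C hlt ih =>
    rw [chunks, dif_pos hlt, cpBBuild, dif_pos (by simp only [List.length_append]; omega)]
    rw [List.append_assoc]
    exact ih
  | case2 term C hge =>
    rw [chunks, dif_neg hge, cpBBuild, dif_neg (by simp only [List.length_append]; omega)]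

-- the loop only exits once the accumulated length has reached n - i
theorem chunks_ge (n : Nat) (seed : Int) (i : Nat) : ∀ (term : Int) (C : List Char),
    n ≤ i + (chunks n seed term i C).length := by
  intro term C
  induction term, C using chunks.induct n seed i with
  | case1 term C hlt ih => rw [chunks, dif_pos hlt]; exact ih
  | case2 term C hge => rw [chunks, dif_neg hge]; omega

-- once build is not a prefix of the target, the built string cannot equal the target
theorem cpBBuild_ne_of_not_prefix (seed : Int) (target : List Char) :
    ∀ (term : Int) (build : List Char), ¬ build <+: target →
      cpBBuild target.length seed term build ≠ target := by
  intro term build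
  induction term, build using cpBBuild.induct target.length seed with
  | case1 term build hlt ih =>
    intro hpre
    rw [cpBBuild, dif_pos hlt]
    exact ih (fun hp => hpre ((List.prefix_append build _).trans hp))
  | case2 term build hlt =>
    intro hpre
    rw [cpBBuild, dif_neg hlt]
    exact fun he => hpre (he ▸ List.prefix_refl target)

-- A's consume loop succeeds iff the ghost-built string equals the target
theorem cpAWhile_eq (seed : Int) (target : List Char) :
    ∀ (term : Int) (rhs build : List Char), build ++ rhs = target →
      cpAWhile seed term rhs = decide (cpBBuild target.length seed term build = target) := by
  intro term rhs
  induction term, rhs using cpAWhile.induct seed with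
  | case1 term =>
    intro build hsplit
    simp only [List.append_nil] at hsplit
    rw [cpAWhile, dif_pos rfl, cpBBuild, dif_neg (by rw [hsplit]; omega)]
    simp [hsplit]
  | case2 term rhs hnil lhs hsw ih =>
    intro build hsplit
    rw [cpAWhile, dif_neg hnil]
    rw [if_pos hsw]
    obtain ⟨rhs', hrhs⟩ := (PySem.Chars.startswith_iff _ _).mp hsw
    have hblt : build.length < target.length := by
      have := congrArg List.length hsplit
      have : rhs.length ≠ 0 := by simpa using hnil
      simp only [List.length_append] at *
      omega
    rw [cpBBuild, dif_pos hblt, PySem.List.slice_from_natCast]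
    rw [PySem.List.slice_from_natCast] at ih
    exact ih (build ++ lhs) (by rw [← hsplit, ← hrhs, List.append_assoc]; simp)
  | case3 term rhs hnil lhs hsw =>
    intro build hsplit
    rw [cpAWhile, dif_neg hnil]
    rw [if_neg hsw]
    have hblt : build.length < target.length := by
      have := congrArg List.length hsplit
      have : rhs.length ≠ 0 := by simpa using hnil
      simp only [List.length_append] at *
      omega
    have hnp : ¬ (build ++ PySem.Int.toChars ((term + 1) * seed)) <+: target := by
      intro hp
      apply hsw
      apply (PySem.Chars.startswith_iff _ _).mpr
      rw [← hsplit] at hp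
      obtain ⟨t, ht⟩ := hp
      rw [List.append_assoc] at ht
      exact ⟨t, List.append_cancel_left ht⟩
    rw [cpBBuild, dif_pos hblt]
    have := cpBBuild_ne_of_not_prefix seed target (term + 1)
      (build ++ PySem.Int.toChars ((term + 1) * seed)) hnp
    simp [this]

-- B's per-prefix check agrees with 'ghost-built string = target'
theorem cpB_check_eq (s : List Char) (k : Nat) (seed : Int) (hseed : 0 ≤ seed)
    (hk1 : 1 ≤ k) (hk2 : k ≤ s.length / 2) :
    ((((k : Int) + (cpBLoop (s.length : Int) (k : Int) seed 0 0 1).2 == (s.length : Int)) &&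
      (PySem.Chars.zfill (PySem.Int.toChars (cpBLoop (s.length : Int) (k : Int) seed 0 0 1).1)
        ((s.length : Int) - (k : Int)) == PySem.List.slice s (some (k : Int)) none)) : Bool) =
    decide (cpBBuild s.length seed 1 (s.take k) = s) := by
  have hk : k ≤ s.length := le_trans hk2 (Nat.div_le_self _ _)
  have hn2 : 2 ≤ s.length := by
    have := Nat.div_le_self s.length 2
    omega
  have htake : (s.take k).length = k := List.length_take_of_le hk
  -- the ghost chunk list for this prefix
  have hck := cpBLoop_chunks s.length k seed hseed 1 [] (by omega) (by decide)
  have hbb := cpBBuild_chunks s.length seed (s.take k) 1 []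
  rw [List.append_nil, htake] at hbb
  set C' := chunks s.length seed 1 k [] with hC'
  have hge := chunks_ge s.length seed k 1 []
  rw [← hC'] at hge
  have hck1 : cpBLoop (s.length : Int) (k : Int) seed 0 0 1
      = ((strV C' : Int), (C'.length : Int)) := by
    have := hck.1
    simpa [strV] using this
  rw [hbb]
  by_cases hlen : k + C'.length = s.length
  · have hne : C' ≠ [] := by
      intro he
      rw [he] at hlen
      simp at hlen
      omega
    have hz := zfill_toChars_strV C' hck.2 hne
    have harg : (s.length : Int) - (k : Int) = (C'.length : Int) := by
      omega
    rw [hck1]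
    simp only [harg]
    rw [hz]
    rw [PySem.List.slice_from s (by omega : (0:Int) ≤ (k:Int))]
    simp only [Int.toNat_natCast]
    have hbeq : ((k : Int) + (C'.length : Int) == (s.length : Int)) = true := by
      simp only [beq_iff_eq]; omega
    rw [hbeq, Bool.true_and]
    by_cases hcd : C' = s.drop k
    · simp only [hcd, beq_self_eq_true]
      simp [List.take_append_drop]
    · have hne2 : s.take k ++ C' ≠ s := by
        intro he
        apply hcd
        have := congrArg (List.drop k) he
        rwa [List.drop_left' htake] at this
      simp [hcd, hne2]
  · -- length mismatch: both sides are false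
    rw [hck1]
    have hbeq : ((k : Int) + (C'.length : Int) == (s.length : Int)) = false := by
      simp only [beq_eq_false_iff_ne]; omega
    rw [hbeq, Bool.false_and]
    have : s.take k ++ C' ≠ s := by
      intro he
      have := congrArg List.length he
      simp only [List.length_append, htake] at this
      omega
    simp [this]

-- the two outer loops agree on the shared index list
theorem cpFor_eq (s : List Char)
    (hpre : (s.take (s.length / 2)).all PySem.Chars.isdigit) :
    ∀ (l : List Int), (∀ j ∈ l, ∃ k : Nat, j = (k : Int) ∧ 1 ≤ k ∧ k ≤ s.length / 2) →
    cpAFor s l = cpBFor s (s.length : Int) l := by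
  intro l
  induction l with
  | nil => intro _; rfl
  | cons j rest ih =>
    intro hmem
    obtain ⟨k, rfl, hk1, hk2⟩ := hmem _ List.mem_cons_self
    have hk : k ≤ s.length := le_trans hk2 (Nat.div_le_self _ _)
    rw [cpAFor, cpBFor]
    have hslice : PySem.List.slice s none (some (k : Int)) = s.take k := by
      rw [PySem.List.slice_to s (by omega : (0:Int) ≤ (k:Int))]
      simp
    cases hseed : PySem.Int.ofChars? (PySem.List.slice s none (some (k : Int))) with
    | none => rfl
    | some seed =>
      dsimp only
      have hdig : (s.take k).all PySem.Chars.isdigit := by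
        apply List.all_eq_true.mpr
        intro c hc
        apply List.all_eq_true.mp hpre
        have h1 : s.take k = (s.take (s.length / 2)).take k := by
          rw [List.take_take, min_eq_left hk2]
        rw [h1] at hc
        exact (List.take_sublist _ _).subset hc
      have hne : s.take k ≠ [] := by
        intro he
        have := congrArg List.length he
        simp only [List.length_take, List.length_nil] at this
        omega
      have hs0 : 0 ≤ seed :=
        ofChars_digits_nonneg (s.take k) hdig hne seed (by rwa [hslice] at hseed)
      have hA : cpAWhile seed 1 (PySem.List.slice s (some (k : Int)) none)
          = decide (cpBBuild s.length seed 1 (s.take k) = s) := by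
        rw [PySem.List.slice_from s (by omega : (0:Int) ≤ (k:Int)), Int.toNat_natCast]
        exact cpAWhile_eq seed s 1 (s.drop k) (s.take k) (List.take_append_drop k s)
      have hB := cpB_check_eq s k seed hs0 hk1 hk2
      rw [hA, hB]
      by_cases hbb : cpBBuild s.length seed 1 (s.take k) = s
      · simp [hbb]
      · simp only [hbb, decide_false, Bool.false_eq_true, if_false]
        exact ih (fun j hj => hmem j (List.mem_cons_of_mem _ hj))

-- ===== VERDICT (by name: the statement is the Claim_ definition above) =====
theorem concatenated_product_spec : Claim_equal_concatenated_product := by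
  intro n_str _ hpre
  unfold Spec_concatenated_product concatenated_product concatenated_product_alt
  apply cpFor_eq _ hpre
  intro j hj
  have h := PySem.List.mem_pyRange_one.mp hj
  exact ⟨j.toNat, by omega, by omega, by omega⟩
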